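-- pv_equiv track=rewrite | github.com/veg/flea-pipeline | flea/util.py | extend_coordinates
-- ===== SOURCE A (Python) =====
-- def extend_coordinates(coordinates, seq, gap=None):
--     """Extend coordinates to a gappy sequence.
--
--     >>> extend_coordinates([1, 2, 3, 4], "a-b-cd")
--     [1, 1, 2, 2, 3, 4]
--
--     """
--     if gap is None:
--         gap = "-"
--     if sum(1 for c in seq if c != gap) != len(coordinates):
--         raise Exception('coordinates do not match source')
--     coords_gen = iter(coordinates)
--     coord = None
--     result = []
--     for char in seq:
--         if char != gap:
--             coord = next(coords_gen)
--         result.append(1 if coord is None else coord)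
--     return result
-- ===== SOURCE B (Python) =====
-- def extend_coordinates(coordinates, seq, gap=None):
--     """Extend coordinates to a gappy sequence (run-length expansion)."""
--     if gap is None:
--         gap = "-"
--     if sum(1 for c in seq if c != gap) != len(coordinates):
--         raise Exception('coordinates do not match source')
--     n = len(seq)
--     result = []
--     i = 0
--     while i < n and seq[i] == gap:
--         result.append(1)
--         i += 1
--     for coord in coordinates:
--         i += 1  # skip this coordinate's non-gap character
--         run = 1
--         while i < n and seq[i] == gap:
--             run += 1
--             i += 1
--         result.extend([coord] * run)
--     return result
-- ===== Notes on version B (the rewrite author's own statement) =====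
-- stated objective: alternative
-- what changed: B replaces A's per-character loop with iterator/last-coordinate state by run-length expansion: it peels leading gaps as literal 1s, then for each coordinate scans the consecutive gaps after its non-gap position and emits the whole block at once.
import Mathlib
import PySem

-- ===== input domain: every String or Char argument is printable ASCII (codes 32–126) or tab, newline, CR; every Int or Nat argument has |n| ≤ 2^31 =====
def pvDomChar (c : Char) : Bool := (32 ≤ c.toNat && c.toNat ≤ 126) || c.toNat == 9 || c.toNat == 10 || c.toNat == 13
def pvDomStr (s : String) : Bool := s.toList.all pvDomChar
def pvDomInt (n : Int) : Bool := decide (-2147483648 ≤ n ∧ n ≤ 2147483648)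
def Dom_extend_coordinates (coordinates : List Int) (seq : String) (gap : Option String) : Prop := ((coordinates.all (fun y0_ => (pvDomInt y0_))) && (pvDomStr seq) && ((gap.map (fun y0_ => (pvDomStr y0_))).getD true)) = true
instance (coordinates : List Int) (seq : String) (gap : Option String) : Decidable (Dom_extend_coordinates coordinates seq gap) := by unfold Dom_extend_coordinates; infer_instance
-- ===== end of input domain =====

-- B replaces A's per-character loop with iterator state by run-length expansion
-- (leading gaps as 1s, then one block per coordinate): an alternative decomposition, same O(n) cost.
-- Pre_ excludes exactly the inputs where A raises ('coordinates do not match source').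


-- ===== PORT A =====
-- A's for-loop over seq with the coordinates iterator and the running `coord`
-- (None → emits 1) as state; rem=[] on a non-gap char is A's StopIteration,
-- unreachable under the count guard.
def aGo (g : String) : List Char → List Int → Option Int → List Int
  | [], _, _ => []
  | ch :: rest, rem, coord =>
    if String.mk [ch] ≠ g then
      match rem with
      | c :: cs => c :: aGo g rest cs (some c)
      | [] => (coord.getD 1) :: aGo g rest [] coord
    else (coord.getD 1) :: aGo g rest rem coord

def extend_coordinates (coordinates : List Int) (seq : String) (gap : Option String) : List Int :=
  let g := gap.getD "-"
  if ((seq.toList.filter (fun c => String.mk [c] ≠ g)).length : Int) ≠ coordinates.length then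
    []  -- Python raises Exception here (excluded by Pre_)
  else
    aGo g seq.toList coordinates none

-- ===== PORT B =====
-- the inner while loop: count the consecutive leading gap characters, return the rest
def gapRun (g : String) : List Char → Nat × List Char
  | [] => (0, [])
  | ch :: rest =>
    if String.mk [ch] = g then
      let (k, r) := gapRun g rest
      (k + 1, r)
    else (0, ch :: rest)

-- the for-loop over coordinates: skip the coordinate's non-gap char, scan the
-- gap run after it, emit the whole block
def bGo (g : String) : List Int → List Char → List Int
  | [], _ => []
  | c :: cs, chars =>
    let (k, r) := gapRun g (chars.drop 1)
    List.replicate (1 + k) c ++ bGo g cs r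

def extend_coordinates_alt (coordinates : List Int) (seq : String) (gap : Option String) : List Int :=
  let g := gap.getD "-"
  if ((seq.toList.filter (fun c => String.mk [c] ≠ g)).length : Int) ≠ coordinates.length then
    []  -- Python raises Exception here (excluded by Pre_)
  else
    let (k0, r0) := gapRun g seq.toList
    List.replicate k0 1 ++ bGo g coordinates r0

-- ===== PRECONDITION & SPEC =====
-- Pre_: the number of non-gap characters equals len(coordinates); otherwise A raises.
def Pre_extend_coordinates (coordinates : List Int) (seq : String) (gap : Option String) : Prop :=
  (seq.toList.filter (fun c => String.mk [c] ≠ gap.getD "-")).length = coordinates.length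
instance (coordinates : List Int) (seq : String) (gap : Option String) : Decidable (Pre_extend_coordinates coordinates seq gap) := by unfold Pre_extend_coordinates; infer_instance

def pvWitness_extend_coordinates : List Int × String × Option String := ([1, 2, 3, 4], "a-b-cd", none)

def Spec_extend_coordinates (coordinates : List Int) (seq : String) (gap : Option String) (out : List Int) : Prop := out = extend_coordinates_alt coordinates seq gap
instance (coordinates : List Int) (seq : String) (gap : Option String) (out : List Int) : Decidable (Spec_extend_coordinates coordinates seq gap out) := by unfold Spec_extend_coordinates; infer_instance

-- ===== CLAIM (what is proved, stated in full; the proofs are below) =====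
def Claim_equal_extend_coordinates : Prop := ∀ (coordinates : List Int) (seq : String) (gap : Option String), Dom_extend_coordinates coordinates seq gap → Pre_extend_coordinates coordinates seq gap → Spec_extend_coordinates coordinates seq gap (extend_coordinates coordinates seq gap)

-- ===== LEMMAS AND PROOFS =====

-- main invariant: when the remaining non-gap chars match the remaining coordinates,
-- A's per-character emission equals B's block emission.
theorem aGo_eq_bGo (g : String) (chars : List Char) :
    ∀ (rem : List Int) (coord : Option Int),
      (chars.filter (fun c => String.mk [c] ≠ g)).length = rem.length →
      aGo g chars rem coord =
        List.replicate (gapRun g chars).1 (coord.getD 1) ++ bGo g rem (gapRun g chars).2 := by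
  induction chars with
  | nil =>
    intro rem coord h
    simp only [List.filter_nil, List.length_nil] at h
    cases rem with
    | nil => simp [aGo, gapRun, bGo]
    | cons c cs => simp at h
  | cons ch rest ih =>
    intro rem coord h
    by_cases hg : String.mk [ch] = g
    · have hfilter : (List.filter (fun c => decide (String.mk [c] ≠ g)) (ch :: rest))
          = List.filter (fun c => decide (String.mk [c] ≠ g)) rest := by
        simp [hg]
      rw [hfilter] at h
      have hih := ih rem coord h
      cases hgr : gapRun g rest with
      | mk k r =>
        simp [hgr] at hih
        simp [aGo, gapRun, hg, hih, hgr, List.replicate_succ]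
    · have hfilter : (List.filter (fun c => decide (String.mk [c] ≠ g)) (ch :: rest))
          = ch :: List.filter (fun c => decide (String.mk [c] ≠ g)) rest := by
        simp [hg]
      rw [hfilter] at h
      cases rem with
      | nil => simp at h
      | cons c cs =>
        simp only [List.length_cons, Nat.succ_inj] at h
        have hih := ih cs (some c) h
        cases hgr : gapRun g rest with
        | mk k r =>
          simp [hgr] at hih
          simp [aGo, gapRun, bGo, hg, hih, hgr, Nat.one_add, List.replicate_succ]

-- ===== VERDICT (by name: the statement is the Claim_ definition above) =====
theorem extend_coordinates_spec : Claim_equal_extend_coordinates := by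
  intro coordinates seq gap _ hpre
  unfold Spec_extend_coordinates extend_coordinates extend_coordinates_alt
  unfold Pre_extend_coordinates at hpre
  have hc : ((seq.toList.filter (fun c => String.mk [c] ≠ gap.getD "-")).length : Int)
      = coordinates.length := by exact_mod_cast hpre
  have hc' : (List.filter (fun c => !decide (String.mk [c] = gap.getD "-")) seq.toList).length
      = coordinates.length := by simpa using hpre
  rw [if_neg (by simp [hc']), if_neg (by simp [hc'])]
  cases hgr : gapRun (gap.getD "-") seq.toList with
  | mk k0 r0 =>
    have hmain := aGo_eq_bGo (gap.getD "-") seq.toList coordinates none hpre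
    simp [hgr] at hmain
    simpa [hgr] using hmain
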